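-- pv_equiv track=rewrite | github.com/ZG4RBU/Jiraiya | jiraiya/utilities/convert_latin_ka.py | convert_latin_ka
-- ===== SOURCE A (Python) =====
-- def convert_latin_ka(text:str) -> str:
--     """
--     converts Goergian text written in latin to Georgian text written in Georgian
--     :param text: text to convert
--     :return: converted text
--     """
--
--     dict_ka = {
--         "შ":["sh","Sh"],
--         "მასტ":["mast","Mast"],
--         "ტრ":["tr","Tr"],
--         "ტვ":["tv","Tv"],
--         "ჭამ":["Cham","cham"],
--         "ღ":["gh","Gh"],
--         "ჩ":["ch","Ch"],
--         "ძ":["dz","Dz"],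
--         "ა":["a","A"],
--         "ბ":["b","B"],
--         "გ":["g","G"],
--         "დ":["d","D"],
--         "ე":["e","E"],
--         "ვ":["v","V"],
--         "ზ":["z","Z"],
--         "თ":["t"],
--         "ი":["i","I"],
--         "კ":["k","K"],
--         "ლ":["l","L"],
--         "მ":["m","M"],
--         "ნ":["n","N"],
--         "ო":["o","O"],
--         "პ":["p","P"],
--         "რ":["r","R"],
--         "ს":["s","S"],
--         "უ":["u","U"],
--         "ფ":["f","F"],
--         "ქ":["q","Q"],
--         "ყ":["y","Y"],
--         "ც":["c","C"],
--         "წ":["w","W"],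
--         "ხ":["x","X"],
--         "ჯ":["j","J"],
--         "ჰ":["h","H"],
--         #"ჟ":["J"]
--     }
--
--     for key, values in dict_ka.items():
--         for value in values:
--             text = text.replace(value, key)
--     return text
-- ===== SOURCE B (Python) =====
-- # Recursive divide-and-conquer: split on the first occurrence of each pattern
-- # (priority order), convert the prefix with the remaining patterns and the
-- # suffix with the same pattern list; exact because replacements are Georgian
-- # and never re-match any Latin pattern.
--
-- _PAIRS = [
--     ("sh", "შ"), ("Sh", "შ"),
--     ("mast", "მასტ"), ("Mast", "მასტ"),
--     ("tr", "ტრ"), ("Tr", "ტრ"),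
--     ("tv", "ტვ"), ("Tv", "ტვ"),
--     ("Cham", "ჭამ"), ("cham", "ჭამ"),
--     ("gh", "ღ"), ("Gh", "ღ"),
--     ("ch", "ჩ"), ("Ch", "ჩ"),
--     ("dz", "ძ"), ("Dz", "ძ"),
--     ("a", "ა"), ("A", "ა"),
--     ("b", "ბ"), ("B", "ბ"),
--     ("g", "გ"), ("G", "გ"),
--     ("d", "დ"), ("D", "დ"),
--     ("e", "ე"), ("E", "ე"),
--     ("v", "ვ"), ("V", "ვ"),
--     ("z", "ზ"), ("Z", "ზ"),
--     ("t", "თ"),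
--     ("i", "ი"), ("I", "ი"),
--     ("k", "კ"), ("K", "კ"),
--     ("l", "ლ"), ("L", "ლ"),
--     ("m", "მ"), ("M", "მ"),
--     ("n", "ნ"), ("N", "ნ"),
--     ("o", "ო"), ("O", "ო"),
--     ("p", "პ"), ("P", "პ"),
--     ("r", "რ"), ("R", "რ"),
--     ("s", "ს"), ("S", "ს"),
--     ("u", "უ"), ("U", "უ"),
--     ("f", "ფ"), ("F", "ფ"),
--     ("q", "ქ"), ("Q", "ქ"),
--     ("y", "ყ"), ("Y", "ყ"),
--     ("c", "ც"), ("C", "ც"),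
--     ("w", "წ"), ("W", "წ"),
--     ("x", "ხ"), ("X", "ხ"),
--     ("j", "ჯ"), ("J", "ჯ"),
--     ("h", "ჰ"), ("H", "ჰ"),
-- ]
--
--
-- def _conv(i, s):
--     if i == len(_PAIRS):
--         return s
--     old, new = _PAIRS[i]
--     res = ""
--     j = s.find(old)
--     while j != -1:
--         res += _conv(i + 1, s[:j]) + new
--         s = s[j + len(old):]
--         j = s.find(old)
--     return res + _conv(i + 1, s)
--
--
-- def convert_latin_ka(text: str) -> str:
--     return _conv(0, text)
-- ===== Notes on version B (the rewrite author's own statement) =====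
-- stated objective: alternative
-- what changed: Replaces A's 60 sequential whole-string replace passes by a single recursive divide-and-conquer: split the text at the first occurrence of each pattern in priority order, convert the prefix with the remaining patterns and the suffix with the same pattern list, concatenating the Georgian replacement in between.
import Mathlib
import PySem

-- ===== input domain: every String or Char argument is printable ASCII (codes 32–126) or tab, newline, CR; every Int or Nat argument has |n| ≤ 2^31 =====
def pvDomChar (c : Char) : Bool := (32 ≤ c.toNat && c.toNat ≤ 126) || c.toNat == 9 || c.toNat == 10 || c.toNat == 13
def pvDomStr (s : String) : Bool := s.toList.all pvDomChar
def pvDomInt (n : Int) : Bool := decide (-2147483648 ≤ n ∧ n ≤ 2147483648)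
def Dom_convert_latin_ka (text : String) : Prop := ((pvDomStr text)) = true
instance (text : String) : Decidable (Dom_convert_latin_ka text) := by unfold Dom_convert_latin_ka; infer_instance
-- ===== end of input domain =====

-- B replaces A's 60 sequential whole-string replace passes by one recursive divide-and-conquer
-- on the first occurrence of each pattern (objective: alternative structure, not speed).

-- ===== PORT A =====
def pvDictKa : List (String × List String) := [
  ("შ", ["sh", "Sh"]),
  ("მასტ", ["mast", "Mast"]),
  ("ტრ", ["tr", "Tr"]),
  ("ტვ", ["tv", "Tv"]),
  ("ჭამ", ["Cham", "cham"]),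
  ("ღ", ["gh", "Gh"]),
  ("ჩ", ["ch", "Ch"]),
  ("ძ", ["dz", "Dz"]),
  ("ა", ["a", "A"]),
  ("ბ", ["b", "B"]),
  ("გ", ["g", "G"]),
  ("დ", ["d", "D"]),
  ("ე", ["e", "E"]),
  ("ვ", ["v", "V"]),
  ("ზ", ["z", "Z"]),
  ("თ", ["t"]),
  ("ი", ["i", "I"]),
  ("კ", ["k", "K"]),
  ("ლ", ["l", "L"]),
  ("მ", ["m", "M"]),
  ("ნ", ["n", "N"]),
  ("ო", ["o", "O"]),
  ("პ", ["p", "P"]),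
  ("რ", ["r", "R"]),
  ("ს", ["s", "S"]),
  ("უ", ["u", "U"]),
  ("ფ", ["f", "F"]),
  ("ქ", ["q", "Q"]),
  ("ყ", ["y", "Y"]),
  ("ც", ["c", "C"]),
  ("წ", ["w", "W"]),
  ("ხ", ["x", "X"]),
  ("ჯ", ["j", "J"]),
  ("ჰ", ["h", "H"])]


def convert_latin_ka (text : String) : String :=
  pvDictKa.foldl (fun t kv => kv.2.foldl (fun t2 v => PySem.Str.replace t2 v kv.1) t) text

-- ===== PORT B =====
def pvPairs : List (List Char × List Char) := [
  (['s', 'h'], ['შ']),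
  (['S', 'h'], ['შ']),
  (['m', 'a', 's', 't'], ['მ', 'ა', 'ს', 'ტ']),
  (['M', 'a', 's', 't'], ['მ', 'ა', 'ს', 'ტ']),
  (['t', 'r'], ['ტ', 'რ']),
  (['T', 'r'], ['ტ', 'რ']),
  (['t', 'v'], ['ტ', 'ვ']),
  (['T', 'v'], ['ტ', 'ვ']),
  (['C', 'h', 'a', 'm'], ['ჭ', 'ა', 'მ']),
  (['c', 'h', 'a', 'm'], ['ჭ', 'ა', 'მ']),
  (['g', 'h'], ['ღ']),
  (['G', 'h'], ['ღ']),
  (['c', 'h'], ['ჩ']),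
  (['C', 'h'], ['ჩ']),
  (['d', 'z'], ['ძ']),
  (['D', 'z'], ['ძ']),
  (['a'], ['ა']),
  (['A'], ['ა']),
  (['b'], ['ბ']),
  (['B'], ['ბ']),
  (['g'], ['გ']),
  (['G'], ['გ']),
  (['d'], ['დ']),
  (['D'], ['დ']),
  (['e'], ['ე']),
  (['E'], ['ე']),
  (['v'], ['ვ']),
  (['V'], ['ვ']),
  (['z'], ['ზ']),
  (['Z'], ['ზ']),
  (['t'], ['თ']),
  (['i'], ['ი']),
  (['I'], ['ი']),
  (['k'], ['კ']),
  (['K'], ['კ']),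
  (['l'], ['ლ']),
  (['L'], ['ლ']),
  (['m'], ['მ']),
  (['M'], ['მ']),
  (['n'], ['ნ']),
  (['N'], ['ნ']),
  (['o'], ['ო']),
  (['O'], ['ო']),
  (['p'], ['პ']),
  (['P'], ['პ']),
  (['r'], ['რ']),
  (['R'], ['რ']),
  (['s'], ['ს']),
  (['S'], ['ს']),
  (['u'], ['უ']),
  (['U'], ['უ']),
  (['f'], ['ფ']),
  (['F'], ['ფ']),
  (['q'], ['ქ']),
  (['Q'], ['ქ']),
  (['y'], ['ყ']),
  (['Y'], ['ყ']),
  (['c'], ['ც']),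
  (['C'], ['ც']),
  (['w'], ['წ']),
  (['W'], ['წ']),
  (['x'], ['ხ']),
  (['X'], ['ხ']),
  (['j'], ['ჯ']),
  (['J'], ['ჯ']),
  (['h'], ['ჰ']),
  (['H'], ['ჰ'])]

-- Source B's inner while-loop over the occurrences of pattern o (f converts a finished piece
-- with the remaining patterns); the o ≠ [] hypothesis only justifies termination.
def pvConvStep (f : List Char → List Char) (o n : List Char) (ho : o ≠ []) (s res : List Char) :
    List Char :=
  let j := PySem.Chars.find s o
  if hj : j = -1 then res ++ f s
  else pvConvStep f o n ho (PySem.List.slice s (some (j + o.length)) none)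
        (res ++ f (PySem.List.slice s none (some j)) ++ n)
termination_by s.length
decreasing_by
  have hinf : o <:+: s := (PySem.Chars.find_ne_neg_one_iff s o).mp hj
  have hj : (0:Int) ≤ PySem.Chars.find s o := (PySem.Chars.find_nonneg_iff s o).mpr hinf
  have hs : s ≠ [] := by
    rintro rfl
    exact ho (List.eq_nil_of_infix_nil hinf)
  have ho1 : 1 ≤ o.length := List.length_pos_iff.mpr ho
  have hlen : 0 < s.length := List.length_pos_iff.mpr hs
  rw [PySem.List.slice_from s (by omega)]
  simp only [List.length_drop]
  omega

-- Source B's _conv, recursing on the pattern-list suffix.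
def pvConvAux : (ps : List (List Char × List Char)) → (∀ p ∈ ps, p.1 ≠ []) → List Char → List Char
  | [], _, s => s
  | (o, n) :: rest, h, s =>
      pvConvStep (pvConvAux rest (fun p hp => h p (List.mem_cons_of_mem _ hp))) o n
        (h (o, n) List.mem_cons_self) s []

def convert_latin_ka_alt (text : String) : String :=
  String.ofList (pvConvAux pvPairs (by decide) text.toList)

-- ===== PRECONDITION & SPEC =====
def Spec_convert_latin_ka (text : String) (out : String) : Prop := out = convert_latin_ka_alt text
instance (text : String) (out : String) : Decidable (Spec_convert_latin_ka text out) := by unfold Spec_convert_latin_ka; infer_instance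

-- ===== CLAIM (what is proved, stated in full; the proofs are below) =====
def Claim_equal_convert_latin_ka : Prop := ∀ (text : String), Dom_convert_latin_ka text → Spec_convert_latin_ka text (convert_latin_ka text)

-- ===== LEMMAS AND PROOFS =====

def pvFlat : List (String × String) := [
  ("sh", "შ"),
  ("Sh", "შ"),
  ("mast", "მასტ"),
  ("Mast", "მასტ"),
  ("tr", "ტრ"),
  ("Tr", "ტრ"),
  ("tv", "ტვ"),
  ("Tv", "ტვ"),
  ("Cham", "ჭამ"),
  ("cham", "ჭამ"),
  ("gh", "ღ"),
  ("Gh", "ღ"),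
  ("ch", "ჩ"),
  ("Ch", "ჩ"),
  ("dz", "ძ"),
  ("Dz", "ძ"),
  ("a", "ა"),
  ("A", "ა"),
  ("b", "ბ"),
  ("B", "ბ"),
  ("g", "გ"),
  ("G", "გ"),
  ("d", "დ"),
  ("D", "დ"),
  ("e", "ე"),
  ("E", "ე"),
  ("v", "ვ"),
  ("V", "ვ"),
  ("z", "ზ"),
  ("Z", "ზ"),
  ("t", "თ"),
  ("i", "ი"),
  ("I", "ი"),
  ("k", "კ"),
  ("K", "კ"),
  ("l", "ლ"),
  ("L", "ლ"),
  ("m", "მ"),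
  ("M", "მ"),
  ("n", "ნ"),
  ("N", "ნ"),
  ("o", "ო"),
  ("O", "ო"),
  ("p", "პ"),
  ("P", "პ"),
  ("r", "რ"),
  ("R", "რ"),
  ("s", "ს"),
  ("S", "ს"),
  ("u", "უ"),
  ("U", "უ"),
  ("f", "ფ"),
  ("F", "ფ"),
  ("q", "ქ"),
  ("Q", "ქ"),
  ("y", "ყ"),
  ("Y", "ყ"),
  ("c", "ც"),
  ("C", "ც"),
  ("w", "წ"),
  ("W", "წ"),
  ("x", "ხ"),
  ("X", "ხ"),
  ("j", "ჯ"),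
  ("J", "ჯ"),
  ("h", "ჰ"),
  ("H", "ჰ")]


-- Structural model of PySem.Chars.replace (greedy left-to-right single-pattern rewrite).
def pvRepl (old new : List Char) : List Char → List Char
  | [] => []
  | c :: t =>
      if h : old ≠ [] ∧ old.isPrefixOf (c :: t) then
        new ++ pvRepl old new (List.drop old.length (c :: t))
      else c :: pvRepl old new t
termination_by s => s.length
decreasing_by
  · have : 1 ≤ old.length := List.length_pos_iff.mpr h.1
    simp only [List.length_drop, List.length_cons]
    omega
  · simp

def pvFoldlRepl (ps : List (List Char × List Char)) (s : List Char) : List Char :=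
  ps.foldl (fun t p => PySem.Chars.replace t p.1 p.2) s

-- the invariant of the pattern list: nonempty ASCII patterns, nonempty non-ASCII replacements
def pvGood (ps : List (List Char × List Char)) : Prop :=
  ∀ p ∈ ps, p.1 ≠ [] ∧ p.2 ≠ [] ∧ (∀ c ∈ p.1, c.toNat < 128) ∧ (∀ c ∈ p.2, 128 ≤ c.toNat)

theorem pvReplGo_eq (old new : List Char) (ho : old ≠ []) :
    ∀ (fuel : Nat) (l acc : List Char), l.length ≤ fuel →
      PySem.Chars.replace.go old new fuel l acc = acc.reverse ++ pvRepl old new l := by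
  intro fuel
  induction fuel with
  | zero =>
      intro l acc hl
      have : l = [] := List.eq_nil_of_length_eq_zero (by omega)
      subst this
      simp [PySem.Chars.replace.go, pvRepl]
  | succ fuel ih =>
      intro l acc hl
      match l with
      | [] => simp [PySem.Chars.replace.go, pvRepl]
      | c :: t =>
          by_cases hp : old.isPrefixOf (c :: t)
          · have h1 : 1 ≤ old.length := List.length_pos_iff.mpr ho
            rw [PySem.Chars.replace.go]
            simp only [hp, if_true]
            rw [ih _ _ (by simp [List.length_drop] at *; omega)]
            rw [pvRepl]
            simp [ho, hp]
          · rw [PySem.Chars.replace.go]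
            simp only [hp]
            rw [ih t (c :: acc) (by simp at hl ⊢; omega)]
            rw [pvRepl]
            simp [hp]

theorem pvReplace_eq_pvRepl (old new s : List Char) (ho : old ≠ []) :
    PySem.Chars.replace s old new = pvRepl old new s := by
  rw [PySem.Chars.replace]
  simp only [List.isEmpty_iff, ho]
  rw [pvReplGo_eq old new ho s.length s [] le_rfl]
  simp

theorem pvRepl_skip (old new : List Char) :
    ∀ (m b : List Char), (∀ c ∈ m, c ∉ old) → pvRepl old new (m ++ b) = m ++ pvRepl old new b := by
  intro m
  induction m with
  | nil => simp
  | cons c t ih =>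
      intro b hm
      have hnp : ¬ (old ≠ [] ∧ old.isPrefixOf (c :: (t ++ b))) := by
        rintro ⟨hne, hp⟩
        match old, hne with
        | o :: os, _ =>
            have hoc : o = c ∧ os <+: (t ++ b) := by simpa [List.isPrefixOf] using hp
            exact hm c (by simp) (by simp [← hoc.1])
      rw [List.cons_append, pvRepl, dif_neg hnp, ih b (fun x hx => hm x (by simp [hx]))]
      simp

theorem pvRepl_append (old new : List Char) (m : List Char) (hm0 : m ≠ [])
    (hm : ∀ c ∈ m, c ∉ old) :
    ∀ (a b : List Char), pvRepl old new (a ++ m ++ b) =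
      pvRepl old new a ++ m ++ pvRepl old new b := by
  suffices H : ∀ (n : Nat) (a b : List Char), a.length ≤ n →
      pvRepl old new (a ++ m ++ b) = pvRepl old new a ++ m ++ pvRepl old new b by
    intro a b; exact H a.length a b le_rfl
  intro n
  induction n with
  | zero =>
      intro a b ha
      have : a = [] := List.eq_nil_of_length_eq_zero (by omega)
      subst this
      simpa [pvRepl] using pvRepl_skip old new m b hm
  | succ n ih =>
      intro a b ha
      match a with
      | [] => simpa [pvRepl] using pvRepl_skip old new m b hm
      | c :: t =>
          by_cases hph : old ≠ [] ∧ old.isPrefixOf (c :: t)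
          · have hpre : old <+: (c :: t) := List.isPrefixOf_iff_prefix.mp hph.2
            have hlen : old.length ≤ (c :: t).length := hpre.length_le
            have h1 : 1 ≤ old.length := List.length_pos_iff.mpr hph.1
            have hp2 : old <+: (c :: (t ++ m ++ b)) := by
              have he : c :: (t ++ m ++ b) = (c :: t) ++ (m ++ b) := by simp
              rw [he]
              exact hpre.trans (List.prefix_append _ _)
            rw [show (c :: t) ++ m ++ b = c :: (t ++ m ++ b) by simp, pvRepl,
              dif_pos ⟨hph.1, List.isPrefixOf_iff_prefix.mpr hp2⟩]
            have hdrop : List.drop old.length (c :: (t ++ m ++ b)) =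
                List.drop old.length (c :: t) ++ m ++ b := by
              rw [show c :: (t ++ m ++ b) = (c :: t) ++ m ++ b by simp]
              rw [List.append_assoc, List.drop_append_of_le_length hlen, List.append_assoc]
            rw [hdrop, ih _ b (by simp at ha ⊢; omega)]
            rw [pvRepl, dif_pos hph]
            simp
          · have hnp : ¬ (old ≠ [] ∧ old.isPrefixOf (c :: (t ++ m ++ b))) := by
              rintro ⟨hne, hp⟩
              have hp' : old <+: ((c :: t) ++ (m ++ b)) := by
                have := List.isPrefixOf_iff_prefix.mp hp
                simpa [List.append_assoc] using this
              by_cases hl : old.length ≤ (c :: t).length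
              · apply hph
                refine ⟨hne, List.isPrefixOf_iff_prefix.mpr ?_⟩
                rcases List.prefix_or_prefix_of_prefix hp' (List.prefix_append _ _) with h | h
                · exact h
                · exact (h.eq_of_length_le hl) ▸ List.prefix_refl _
              · have hao : (c :: t) <+: old := by
                  rcases List.prefix_or_prefix_of_prefix hp' (List.prefix_append _ _) with h | h
                  · exact absurd h.length_le (by omega)
                  · exact h
                obtain ⟨d, hd⟩ := hao
                have hdne : d ≠ [] := by
                  rintro rfl
                  apply hl
                  rw [← hd]
                  simp
                have hdp : d <+: m ++ b := by
                  have hx : (c :: t) ++ d <+: (c :: t) ++ (m ++ b) := hd ▸ hp'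
                  exact (List.prefix_append_right_inj (c :: t)).mp hx
                match d, hdne with
                | dh :: dt, _ =>
                    match m, hm0 with
                    | mh :: mt, _ =>
                        have hdm : dh = mh := by
                          obtain ⟨r, hr⟩ := hdp
                          simpa using congrArg (fun l => l.head?) hr
                        have hdh : dh ∈ old := by
                          rw [← hd]; simp
                        exact hm mh (by simp) (hdm ▸ hdh)
            rw [show (c :: t) ++ m ++ b = c :: (t ++ m ++ b) by simp, pvRepl, dif_neg hnp]
            rw [ih t b (by simp at ha; omega), pvRepl, dif_neg hph]
            simp

theorem pvRepl_no_occ (old new : List Char) :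
    ∀ s, ¬ old <:+: s → pvRepl old new s = s := by
  intro s
  induction s with
  | nil => intro _; simp [pvRepl]
  | cons c t ih =>
      intro h
      have hnp : ¬ (old ≠ [] ∧ old.isPrefixOf (c :: t)) := by
        rintro ⟨hne, hp⟩
        exact h ((List.isPrefixOf_iff_prefix.mp hp).isInfix)
      rw [pvRepl, dif_neg hnp, ih (fun hi => h (List.infix_cons hi))]

theorem pvRepl_first_occ (old new : List Char) (ho : old ≠ []) :
    ∀ (k : Nat) (s : List Char), old <+: List.drop k s → (∀ i < k, ¬ old <+: List.drop i s) →
      pvRepl old new s = List.take k s ++ new ++ pvRepl old new (List.drop (k + old.length) s) := by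
  intro k
  induction k with
  | zero =>
      intro s hk _
      simp only [List.drop_zero] at hk
      match s with
      | [] => exact absurd (List.prefix_nil.mp hk) ho
      | c :: t =>
          rw [pvRepl, dif_pos ⟨ho, List.isPrefixOf_iff_prefix.mpr hk⟩]
          simp
  | succ k ih =>
      intro s hk hmin
      match s with
      | [] =>
          simp only [List.drop_nil] at hk
          exact absurd (List.prefix_nil.mp hk) ho
      | c :: t =>
          have h0 : ¬ old <+: (c :: t) := by
            have := hmin 0 (Nat.succ_pos k)
            simpa using this
          rw [pvRepl, dif_neg (by rintro ⟨_, hp⟩; exact h0 (List.isPrefixOf_iff_prefix.mp hp))]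
          rw [ih t (by simpa using hk) (fun i hi => by simpa using hmin (i + 1) (by omega))]
          simp [Nat.succ_add]

theorem pvFoldl_dist (ps : List (List Char × List Char)) (hg : pvGood ps)
    (m : List Char) (hm0 : m ≠ []) (hm : ∀ c ∈ m, 128 ≤ c.toNat) :
    ∀ (a b : List Char),
      pvFoldlRepl ps (a ++ m ++ b) = pvFoldlRepl ps a ++ m ++ pvFoldlRepl ps b := by
  induction ps with
  | nil => intro a b; simp [pvFoldlRepl]
  | cons p ps ih =>
      intro a b
      obtain ⟨o, n⟩ := p
      obtain ⟨ho, -, hoa, -⟩ := hg (o, n) List.mem_cons_self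
      have hmo : ∀ c ∈ m, c ∉ o := fun c hc hco => by
        have := hoa c hco; have := hm c hc; omega
      have hstep : ∀ x : List Char,
          pvFoldlRepl ((o, n) :: ps) x = pvFoldlRepl ps (PySem.Chars.replace x o n) := by
        intro x; simp [pvFoldlRepl, List.foldl]
      rw [hstep, hstep, hstep, pvReplace_eq_pvRepl _ _ _ ho, pvReplace_eq_pvRepl _ _ _ ho,
        pvReplace_eq_pvRepl _ _ _ ho, pvRepl_append o n m hm0 hmo a b,
        ih (fun p hp => hg p (List.mem_cons_of_mem _ hp))]

theorem pvConvStep_spec (f : List Char → List Char) (o n : List Char) (ho : o ≠ [])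
    (ps : List (List Char × List Char)) (hg : pvGood ((o, n) :: ps))
    (hf : ∀ s, f s = pvFoldlRepl ps s) :
    ∀ (s res : List Char), pvConvStep f o n ho s res = res ++ pvFoldlRepl ((o, n) :: ps) s := by
  have hgps : pvGood ps := fun p hp => hg p (List.mem_cons_of_mem _ hp)
  obtain ⟨-, hn0, -, hnh⟩ := hg (o, n) List.mem_cons_self
  have hstep : ∀ x : List Char,
      pvFoldlRepl ((o, n) :: ps) x = pvFoldlRepl ps (PySem.Chars.replace x o n) := by
    intro x; simp [pvFoldlRepl, List.foldl]
  suffices H : ∀ (fuel : Nat) (s res : List Char), s.length ≤ fuel →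
      pvConvStep f o n ho s res = res ++ pvFoldlRepl ((o, n) :: ps) s by
    intro s res; exact H s.length s res le_rfl
  intro fuel
  induction fuel with
  | zero =>
      intro s res hs
      have : s = [] := List.eq_nil_of_length_eq_zero (by omega)
      subst this
      have hfind : PySem.Chars.find [] o = -1 := by
        rw [PySem.Chars.find_eq_neg_one_iff]
        intro hinf
        exact ho (List.eq_nil_of_infix_nil hinf)
      rw [pvConvStep]
      split
      · rw [hf, hstep, pvReplace_eq_pvRepl _ _ _ ho,
          pvRepl_no_occ o n [] (fun hinf => ho (List.eq_nil_of_infix_nil hinf))]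
      · rename_i hcon; exact absurd hfind hcon
  | succ fuel ih =>
      intro s res hs
      by_cases hj : PySem.Chars.find s o = -1
      · rw [pvConvStep]
        split
        · rw [hf, hstep, pvReplace_eq_pvRepl _ _ _ ho,
            pvRepl_no_occ o n s ((PySem.Chars.find_eq_neg_one_iff s o).mp hj)]
        · rename_i hcon; exact absurd hj hcon
      · have hj0 : (0:Int) ≤ PySem.Chars.find s o :=
          (PySem.Chars.find_nonneg_iff s o).mpr ((PySem.Chars.find_ne_neg_one_iff s o).mp hj)
        have hspec := PySem.Chars.findFrom_natCast_spec s o 0 (Nat.zero_le _)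
          (by rw [Nat.cast_zero, PySem.Chars.findFrom_zero]; exact hj)
        rw [Nat.cast_zero, PySem.Chars.findFrom_zero] at hspec
        obtain ⟨-, hpre, hmin⟩ := hspec
        set k : Nat := (PySem.Chars.find s o).toNat with hk
        have ho1 : 1 ≤ o.length := List.length_pos_iff.mpr ho
        have hkle : k + o.length ≤ s.length := by
          have := hpre.length_le
          simp only [List.length_drop] at this
          have hfle := PySem.Chars.find_le_length s o
          omega
        have hrepl : PySem.Chars.replace s o n =
            List.take k s ++ n ++ PySem.Chars.replace (List.drop (k + o.length) s) o n := by
          rw [pvReplace_eq_pvRepl _ _ _ ho, pvReplace_eq_pvRepl _ _ _ ho]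
          exact pvRepl_first_occ o n ho k s hpre (fun i hi => hmin i (Nat.zero_le _) hi)
        rw [pvConvStep]
        split
        · rename_i hcon; exact absurd hcon hj
        rw [PySem.List.slice_to s hj0, PySem.List.slice_from s (by omega)]
        have htn : (PySem.Chars.find s o + (o.length : Int)).toNat = k + o.length := by
          omega
        rw [htn]
        rw [ih (List.drop (k + o.length) s) _ (by simp only [List.length_drop]; omega)]
        rw [hstep s, hrepl, hf (List.take k s)]
        rw [pvFoldl_dist ps hgps n hn0 hnh]
        rw [hstep (List.drop (k + o.length) s)]
        simp [List.append_assoc]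

theorem pvConvAux_spec (ps : List (List Char × List Char)) (hg : pvGood ps) :
    ∀ (h : ∀ p ∈ ps, p.1 ≠ []) (s : List Char), pvConvAux ps h s = pvFoldlRepl ps s := by
  induction ps with
  | nil => intro h s; simp [pvConvAux, pvFoldlRepl]
  | cons p ps ih =>
      intro h s
      obtain ⟨o, n⟩ := p
      rw [pvConvAux]
      rw [pvConvStep_spec _ o n _ ps hg
        (ih (fun q hq => hg q (List.mem_cons_of_mem _ hq)) _)]
      simp

theorem pvStrFold_toList (ps : List (String × String)) :
    ∀ (s : String), (ps.foldl (fun t p => PySem.Str.replace t p.1 p.2) s).toList =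
      pvFoldlRepl (ps.map (fun p => (p.1.toList, p.2.toList))) s.toList := by
  induction ps with
  | nil => intro s; simp [pvFoldlRepl]
  | cons p ps ih =>
      intro s
      simp only [List.foldl_cons, List.map_cons]
      rw [ih]
      have : (PySem.Str.replace s p.1 p.2).toList =
          PySem.Chars.replace s.toList p.1.toList p.2.toList := PySem.Str.toList_replace s p.1 p.2
      simp [pvFoldlRepl, this]

theorem pvA_flat (text : String) :
    convert_latin_ka text = pvFlat.foldl (fun t p => PySem.Str.replace t p.1 p.2) text := by
  simp only [convert_latin_ka, pvDictKa, pvFlat, List.foldl]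

theorem pvPairs_eq : pvFlat.map (fun p => (p.1.toList, p.2.toList)) = pvPairs := by decide

theorem pvGood_pvPairs : pvGood pvPairs := by unfold pvGood pvPairs; simp

-- ===== VERDICT (by name: the statement is the Claim_ definition above) =====
theorem convert_latin_ka_spec : Claim_equal_convert_latin_ka := by
  intro text _
  unfold Spec_convert_latin_ka
  have hA : (convert_latin_ka text).toList = pvFoldlRepl pvPairs text.toList := by
    rw [pvA_flat, pvStrFold_toList, pvPairs_eq]
  have hB : convert_latin_ka_alt text = String.ofList (pvFoldlRepl pvPairs text.toList) := by
    rw [convert_latin_ka_alt, pvConvAux_spec pvPairs pvGood_pvPairs]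
  rw [hB, ← hA, String.ofList_toList]
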